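/- GENERATED by mk_final_copies.py from the proof of the farm's unit `codebook_decode_step` (farm:codebook_decode_step.1: Proof.lean) as the
   re-elaboration sweep compiled it — do not edit. -/
import Asan.CheckWalk
import Vorbis.Spec.Units.codebook_decode_step

open X86 X86.User Asan Vorbis Vorbis.Spec

set_option maxRecDepth 4000
set_option maxHeartbeats 16000000

namespace Vorbis.Spec.codebook_decode_step

/-- Where the struct at `c` is: above the text, in the data space, off the stack below `top` (one fact for `u_omega`). -/
theorem book_where {others : List Obj} {frames : List (Nat × FrameLayout)} {Blk : Block → Prop} {len : Nat} {u : State}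
    (h : BookPre others frames Blk len u) (htop : 0x700000 < (u.reg .rsp).toNat + 8) :
    0x119d40 ≤ (u.reg .rsi).toNat ∧ (u.reg .rsi).toNat + 2120 ≤ 0xC00000 ∧
      ((u.reg .rsp).toNat + 8 ≤ (u.reg .rsi).toNat ∨ (u.reg .rsi).toNat + 2120 ≤ 0x700000 ∨
        0x800000 ≤ (u.reg .rsi).toNat) := by
  obtain ⟨B, hB, hBin⟩ := h.book
  simp only [vblock, voff] at hBin
  obtain ⟨hb1, hb2⟩ := hBin
  have hw := blk_where h.reader.env.live h.reader.shadow.inv h.reader.shadow.offText htop hB (by omega)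
  have e : L.textHi = 0x119d40 := rfl
  omega

/-- Where the `sorted_values` block of the book is (when it exists). -/
theorem sv_where {others : List Obj} {frames : List (Nat × FrameLayout)} {Blk : Block → Prop} {len : Nat} {u : State}
    (h : BookPre others frames Blk len u) (htop : 0x700000 < (u.reg .rsp).toNat + 8)
    (hse : 1 ≤ Codebook.sorted_entries u.mem (u.reg .rsi).toNat) :
    0x119d40 ≤ (Codebook.svBlock u.mem (u.reg .rsi).toNat).base ∧
      (Codebook.svBlock u.mem (u.reg .rsi).toNat).base + (Codebook.svBlock u.mem (u.reg .rsi).toNat).size ≤ 0xC00000 ∧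
      ((u.reg .rsp).toNat + 8 ≤ (Codebook.svBlock u.mem (u.reg .rsi).toNat).base ∨
        (Codebook.svBlock u.mem (u.reg .rsi).toNat).base + (Codebook.svBlock u.mem (u.reg .rsi).toNat).size ≤ 0x700000 ∨
        0x800000 ≤ (Codebook.svBlock u.mem (u.reg .rsi).toNat).base) := by
  have hw := blk_where h.reader.env.live h.reader.shadow.inv h.reader.shadow.offText htop (h.cb.K4.sv hse)
    (by simp only []; omega)
  have e : L.textHi = 0x119d40 := rfl
  rw [e] at hw
  exact hw



/-- `test eax, eax ; js` not taken: the 32-bit value is a non-negative `int`. -/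
theorem lt_of_msb_false (z : Word) (h : (Word.part .w32 z).msb = false) : z.toNat % 2 ^ 32 < 2 ^ 31 := by
  rw [BitVec.msb_eq_decide, Asan.part32_toNat] at h
  simp only [decide_eq_false_iff_not, Nat.not_le] at h
  omega

/-- The signed value of a small 32-bit vector is its number. -/
theorem toInt_small (x : BitVec 32) (h : x.toNat < 2 ^ 31) : x.toInt = (x.toNat : Int) :=
  toInt_of_lt x h

/-- `lea ebx, [rbp + r14] ; movsxd rbx, ebx ; shl rbx, 2 ; add rbx, [r12 + 0x20]`: the address of `multiplicands[zd + i]`. -/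
theorem mult_addr (ib zd : BitVec 32) (M : Nat) (h : ib.toNat + zd.toNat < 2 ^ 31)
    (hM : M + 4 * (zd.toNat + ib.toNat) < 2 ^ 64) :
    (Word.ofBV (BitVec.signExtend 64 (BitVec.setWidth 32 (Word.ofBV ib + Word.ofBV zd).toBitVec)) <<< 2 +
      UInt64.ofNat M).toNat = M + 4 * (zd.toNat + ib.toNat) := by
  have e1 : (BitVec.setWidth 32 (Word.ofBV ib + Word.ofBV zd).toBitVec).toNat = ib.toNat + zd.toNat := by
    rw [BitVec.toNat_setWidth, UInt64.toNat_toBitVec, UInt64.toNat_add, Vorbis.toNat_ofBV32, Vorbis.toNat_ofBV32]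
    omega
  have e2 := toNat_sext32 (BitVec.setWidth 32 (Word.ofBV ib + Word.ofBV zd).toBitVec) (by omega)
  rw [UInt64.toNat_add, UInt64.toNat_shiftLeft, UInt64.toNat_ofNat', e2, e1]
  have e3 : (2 : UInt64).toNat % 64 = 2 := by decide
  rw [e3]
  simp only [Nat.shiftLeft_eq, Nat.reducePow]
  omega

/-- `imul eax, r15d ; cdqe ; lea rbx, [rdx + rax*4]`: the address of `output[i * step]`. -/
theorem out_addr (p : Word) (ib sb : BitVec 32) (h : ib.toNat * sb.toNat < 2 ^ 31)
    (hp : p.toNat + 4 * (ib.toNat * sb.toNat) < 2 ^ 64) :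
    (p + Word.ofBV (BitVec.signExtend 64 (ib * sb)) * 4).toNat = p.toNat + 4 * (ib.toNat * sb.toNat) := by
  have e1 : (ib * sb).toNat = ib.toNat * sb.toNat := by
    rw [BitVec.toNat_mul]
    apply Nat.mod_eq_of_lt
    omega
  have e2 := toNat_sext32 (ib * sb) (by omega)
  exact add_mul4 p _ _ (e2.trans e1) hp

/-- Element `i < len'` of the strided window lies inside its coarse bound. -/
theorem step_in {len' step i : Nat} (hi : i < len') :
    i * step ≤ (len' - 1) * step ∧ 4 * (i * step) + 4 ≤ stepBytes len' step := by
  have h1 : i * step ≤ (len' - 1) * step := Nat.mul_le_mul_right step (by omega)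
  refine ⟨h1, ?_⟩
  unfold stepBytes
  rw [if_neg (by omega)]
  omega

/-- The next value of the loop counter. -/
theorem succ_toNat (ib : BitVec 32) (h : ib.toNat < 65535) : (ib + 1#32).toNat = ib.toNat + 1 := by
  rw [BitVec.toNat_add]
  have e : (1#32).toNat = 1 := by decide
  rw [e]
  omega

/-- `imul r14d, ebx`: `dimensions * z` without wrap. -/
theorem mul_toNat (a b : BitVec 32) (h : a.toNat * b.toNat < 2 ^ 32) : (a * b).toNat = a.toNat * b.toNat := by
  rw [BitVec.toNat_mul]
  exact Nat.mod_eq_of_lt h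


/-- The fields of the struct at `c` read the same after stores inside windows that do not meet it. -/
theorem fields_kept {others : List Obj} {frames : List (Nat × FrameLayout)} {Blk : Block → Prop} {len : Nat} {u : State}
    (h : BookPre others frames Blk len u) {ws : List Span} {m : Mem} (hs : Mem.SameExcept ws u.mem m)
    (hd : ∀ w, w ∈ ws → (u.reg .rsi).toNat + 2120 ≤ w.lo ∨ w.hi ≤ (u.reg .rsi).toNat) :
    Codebook.SameFields u.mem m (u.reg .rsi).toNat := by
  obtain ⟨B, hB, hin⟩ := h.book
  exact Codebook.SameFields.of_kept (Block.Kept.of_sameExcept hs hd (Codebook.block_no_wrap h.ok hB hin))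

/-- A field of the struct at `c` is a check site (CB0: the struct lies inside an allocated block). -/
theorem book_site {others : List Obj} {frames : List (Nat × FrameLayout)} {Blk : Block → Prop} {len : Nat} {u : State}
    (h : BookPre others frames Blk len u) (off n : Nat) (hn : 1 ≤ n) (ho : off + n ≤ 2120) :
    Site (Live (stackObjs frames ++ others)) ((u.reg .rsi).toNat + off) n := by
  obtain ⟨B, hB, hin⟩ := h.book
  simp only [vblock, voff] at hin
  obtain ⟨h1, h2⟩ := hin
  exact Site.of_blk h.reader.env.live hB (by omega) (by omega) hn

/-- The reader's post over stores that left `*f` alone (our stack slots, the floats of the window). -/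
theorem reader_carry {Blk : Block → Prop} {len : Nat} {m0 m1 m2 : Mem} {f : Nat} (h : ReaderPost Blk len m0 m1 f)
    (he : Mem.EqOn f (f + 1808) m1 m2) (hf : f + 1808 ≤ 2 ^ 64) : ReaderPost Blk len m0 m2 f := by
  have hobj : (objBlock f).Same m1 m2 := he
  refine ⟨h.bits.frame_fields (Bits.SameFields.of_same hobj), ?_⟩
  have h1 := mu_frame_obj hf hobj
  have h2 := h.mu_le
  omega

/-- `cbw / cwde / cdqe` (opcode 98) with the `match` on the operand width written as two tests of the operand size. Given to the
walk over `cdqe` (0x10e652) as a rewrite rule, so that `simp` never meets the model's `match`: the first reduction of that `match`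
makes Lean declare `X86.Insn.CBW_CWDE_CDQE.cbw._sparseCasesOn_1.else_eq` and `…cbw.match_1.splitter._sparseCasesOn_3` in the
worker's module, which the verdict's name check rejects (see NOTES.md). -/
theorem cbw_if (e : Encoding) : X86.Insn.CBW_CWDE_CDQE.cbw e = (do
    Insn.Encoding.checkNoLock e
    let b ← Insn.operandBits e
    if b = 16 then (do
      let x ← Sem.get (RegRef.gprT Width.w8 Reg.rax)
      Sem.put (RegRef.gprT Width.w16 Reg.rax) (BitVec.signExtend 16 x))
    else if b = 32 then (do
      let x ← Sem.get (RegRef.gprT Width.w16 Reg.rax)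
      Sem.put (RegRef.gprT Width.w32 Reg.rax) (BitVec.signExtend 32 x))
    else (do
      let x ← Sem.get (RegRef.gprT Width.w32 Reg.rax)
      Sem.put (RegRef.gprT Width.w64 Reg.rax) (BitVec.signExtend 64 x))) := by
  unfold X86.Insn.CBW_CWDE_CDQE.cbw
  congr 1
  funext _
  congr 1
  funext b
  by_cases h8 : b = 8
  · subst h8
    rfl
  · by_cases h16 : b = 16
    · subst h16
      rfl
    · by_cases h32 : b = 32
      · subst h32
        rfl
      · have e8 : ¬ (b == 8) = true := by
          rw [beq_iff_eq]
          exact h8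
        have e16 : ¬ (b == 16) = true := by
          rw [beq_iff_eq]
          exact h16
        have e32 : ¬ (b == 32) = true := by
          rw [beq_iff_eq]
          exact h32
        unfold Width.ofBits
        rw [if_neg e8, if_neg e16, if_neg e32, if_neg h16, if_neg h32]

/-- The operand size of `cdqe` is not 16 (a rewrite rule of the walk, with `cbw_if`). -/
theorem ne16 : ((64 : Nat) = 16) = False := by decide

/-- The operand size of `cdqe` is not 32. -/
theorem ne32 : ((64 : Nat) = 32) = False := by decide

end Vorbis.Spec.codebook_decode_step

/-- `codebook_decode_step` satisfies its contract: six pushes, the call of `codebook_decode_start`, the clamp of `len`, the loop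
over `output[i * step]` (four check calls, one float store), pops, `ret`. -/
theorem Vorbis.Spec.Worked.codebook_decode_step_ok : Vorbis.Spec.codebook_decode_step.Statement := by
  intro Lay hLay μ hμ u₀ hcode hstart hload4 hload8 hload1 others frames Blk len u ret he hpre
  v_entry he
  have hstart' := hstart others frames Blk len
  obtain ⟨hbp, hstep, hwin⟩ := hpre
  have hsh : ShadowPre others frames u := hbp.reader.shadow
  have hsp := hsh.rsp
  have hwf := hbp.reader.where_obj
  have htop : 0x700000 < (u.reg .rsp).toNat + 8 := by omega
  have hwc := Vorbis.Spec.codebook_decode_step.book_where hbp htop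
  have hwsv := Vorbis.Spec.codebook_decode_step.sv_where hbp htop
  -- 0x10e5c0 … 0x10e5dc: the pushes, the spills, the call of codebook_decode_start (stb_vorbis_fixed.c:1863)
  u_walk hcode [hμ.vendor] until [Vorbis.L.codebook_decode_step.cut1, Vorbis.L.codebook_decode_step.loop1] span [Vorbis.L.textLo, Vorbis.L.textHi] side (v_side)
  case call_inv => v_inv
  case pre_10e5dc =>
    show BookPre others frames Blk len s_10e5dc
    have hsame : Mem.SameExcept [⟨(u.reg .rsp).toNat - 80, (u.reg .rsp).toNat⟩] u.mem s_10e5dc.mem := by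
      u_same
    have hsh' : ShadowPre others frames s_10e5dc := by
      refine hsh.callee ?_ ?_ ?_ ?_
      · v_untouched
      · rw [w_rsp]
        u_omega
      · rw [w_rsp]
        u_omega
      · rw [w_rsp]
        u_omega
    have hb := Reader.bits_of_window hbp.reader.bits hsame (by omega)
    refine hbp.carry hsh' (w_kept.get .rdi rfl) (w_kept.get .rsi rfl) hb hsame ?_ ?_
    · intro w hw
      have e : w = ⟨(u.reg .rsp).toNat - 80, (u.reg .rsp).toNat⟩ := List.mem_singleton.mp hw
      subst e
      simp only [voff]
      omega
    · intro hse w hw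
      have e : w = ⟨(u.reg .rsp).toNat - 80, (u.reg .rsp).toNat⟩ := List.mem_singleton.mp hw
      subst e
      have := hwsv hse
      simp only [] at this ⊢
      omega
  -- 0x10e5e1 (cut1): after the return of codebook_decode_start
  v_after_call w_rsp_10e5dc w_mem_10e5dc
  obtain ⟨hpun, hprd, hphi, hpres⟩ := w_post
  have c_rdi : s_10e5dc.reg .rdi = u.reg .rdi := w_kept_10e5dc.get .rdi rfl
  have c_rsi : s_10e5dc.reg .rsi = u.reg .rsi := w_kept_10e5dc.get .rsi rfl
  rw [c_rdi] at w_same hprd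
  rw [c_rsi] at hpres
  obtain ⟨z, w_rax⟩ : ∃ z, s_10e5dcr.reg .rax = z := ⟨_, rfl⟩
  rw [w_rax] at hphi hpres
  -- the callee was entered with our pushes only: the book's fields, `Bits f` and μ are those of our entry
  have hsame0 : Mem.SameExcept [⟨(u.reg .rsp).toNat - 80, (u.reg .rsp).toNat⟩] u.mem s_10e5dc.mem := by
    u_same
  have hsf0 : Codebook.SameFields u.mem s_10e5dc.mem (u.reg .rsi).toNat := by
    refine Vorbis.Spec.codebook_decode_step.fields_kept hbp hsame0 ?_
    intro w hw
    have e : w = ⟨(u.reg .rsp).toNat - 80, (u.reg .rsp).toNat⟩ := List.mem_singleton.mp hw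
    subst e
    simp only []
    omega
  rw [hsf0.N, hsf0.lookup_type] at hpres
  have hrw0 := Reader.reader_of_window hbp.reader.bits hsame0 (by omega)
  have hrp0 : ReaderPost Blk len u.mem s_10e5dcr.mem (u.reg .rdi).toNat := by
    refine ⟨hprd.bits, ?_⟩
    have h1 := hprd.mu_le
    have h2 := hrw0.2
    omega
  have hcf : (u.reg .rsi).toNat + 2120 ≤ (u.reg .rdi).toNat ∨ (u.reg .rdi).toNat + 1808 ≤ (u.reg .rsi).toNat := by
    have := hbp.apart.book
    simp only [vblock, voff] at this
    exact this
  -- the stack slots, over the callee's footprint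
  have hs0 : UInt64.ofNat (s_10e5dcr.mem.readLE (u.reg .rsp) 8) = ret := by
    u_frame he_retAddr
  have hp1 : UInt64.ofNat (s_10e5dc.mem.readLE (u.reg .rsp - 8) 8) = u.reg .r15 := by u_resolve
  have hp2 : UInt64.ofNat (s_10e5dc.mem.readLE (u.reg .rsp - 16) 8) = u.reg .r14 := by u_resolve
  have hp3 : UInt64.ofNat (s_10e5dc.mem.readLE (u.reg .rsp - 24) 8) = u.reg .r13 := by u_resolve
  have hp4 : UInt64.ofNat (s_10e5dc.mem.readLE (u.reg .rsp - 32) 8) = u.reg .r12 := by u_resolve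
  have hp5 : UInt64.ofNat (s_10e5dc.mem.readLE (u.reg .rsp - 40) 8) = u.reg .rbp := by u_resolve
  have hp6 : UInt64.ofNat (s_10e5dc.mem.readLE (u.reg .rsp - 48) 8) = u.reg .rbx := by u_resolve
  have hp7 : UInt64.ofNat (s_10e5dc.mem.readLE (u.reg .rsp - 64) 8) = u.reg .rdx := by u_resolve
  rw [w_mem_10e5dc] at hp1 hp2 hp3 hp4 hp5 hp6 hp7
  have hs1 : UInt64.ofNat (s_10e5dcr.mem.readLE (u.reg .rsp - 8) 8) = u.reg .r15 := by u_frame hp1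
  have hs2 : UInt64.ofNat (s_10e5dcr.mem.readLE (u.reg .rsp - 16) 8) = u.reg .r14 := by u_frame hp2
  have hs3 : UInt64.ofNat (s_10e5dcr.mem.readLE (u.reg .rsp - 24) 8) = u.reg .r13 := by u_frame hp3
  have hs4 : UInt64.ofNat (s_10e5dcr.mem.readLE (u.reg .rsp - 32) 8) = u.reg .r12 := by u_frame hp4
  have hs5 : UInt64.ofNat (s_10e5dcr.mem.readLE (u.reg .rsp - 40) 8) = u.reg .rbp := by u_frame hp5
  have hs6 : UInt64.ofNat (s_10e5dcr.mem.readLE (u.reg .rsp - 48) 8) = u.reg .rbx := by u_frame hp6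
  have hs7 : UInt64.ofNat (s_10e5dcr.mem.readLE (u.reg .rsp - 64) 8) = u.reg .rdx := by u_frame hp7
  clear hp1 hp2 hp3 hp4 hp5 hp6 hp7
  -- the two fields of the book the code reads by value: `dimensions` (D) and `multiplicands` (M)
  obtain ⟨D, hDu⟩ : ∃ D, u.mem.readLE (u.reg .rsi) 4 = D := ⟨_, rfl⟩
  obtain ⟨M, hMu⟩ : ∃ M, u.mem.readLE (u.reg .rsi + 32) 8 = M := ⟨_, rfl⟩
  have hDr : s_10e5dcr.mem.readLE (u.reg .rsi) 4 = D := by u_frame hDu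
  have hMr : s_10e5dcr.mem.readLE (u.reg .rsi + 32) 8 = M := by u_frame hMu
  have hdim : Codebook.dimensions u.mem (u.reg .rsi).toNat = sint32 D := by
    simp only [vacc, voff, Nat.add_zero]
    unfold Mem.i32 Mem.u32
    rw [addr_toNat, hDu]
  have hmul : Codebook.multiplicands u.mem (u.reg .rsi).toNat = M := by
    simp only [vacc, voff]
    unfold Mem.u64
    exact (readLE_field u.mem (u.reg .rsi) 32 8).symm.trans hMu
  have hD32 : D < 2 ^ 32 := by
    rw [← hDu]
    exact Mem.readLE_lt u.mem (u.reg .rsi) 4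
  have hD1 : 1 ≤ D ∧ D ≤ 65535 := by
    have h1 := hbp.cb.K1.dim_pos
    have h2 := hbp.cb.K1.dim_le
    rw [hdim] at h1 h2
    have := sint32_cases D
    omega
  have hdimD : Codebook.dimensions u.mem (u.reg .rsi).toNat = (D : Int) := by
    rw [hdim]
    have := sint32_cases D
    omega
  -- the strided window: element `i < len'` lies inside it, and `i * step` is small
  have hfw : ∀ i, i < decodeLen u.mem (u.reg .rsi).toNat (argInt (u.reg .rcx)) →
      i * argU32 (u.reg .r8) < 2 ^ 29 ∧
      4 * (i * argU32 (u.reg .r8)) + 4 ≤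
        stepBytes (decodeLen u.mem (u.reg .rsi).toNat (argInt (u.reg .rcx))) (argU32 (u.reg .r8)) ∧
      FloatWindow others frames u.mem (u.reg .rdi).toNat (u.reg .rsi).toNat (u.reg .rdx).toNat
        (stepBytes (decodeLen u.mem (u.reg .rsi).toNat (argInt (u.reg .rcx))) (argU32 (u.reg .r8))) := by
    intro i hi
    obtain ⟨h1, h2⟩ := hwin (by omega)
    obtain ⟨h3, h4⟩ := Vorbis.Spec.codebook_decode_step.step_in (step := argU32 (u.reg .r8)) hi
    exact ⟨by omega, h4, h2⟩
  obtain ⟨W, hW⟩ : ∃ W, stepBytes (decodeLen u.mem (u.reg .rsi).toNat (argInt (u.reg .rcx))) (argU32 (u.reg .r8)) = W :=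
    ⟨_, rfl⟩
  rw [hW] at hfw
  clear hwin
  -- 0x10e615 (loop1): the loop, entered from both arms of `if (len > c->dimensions)`
  have hloop : ∀ (s : State) (n13 zd : BitVec 32),
      (Word.part .w32 z).msb = false →
      n13.toInt = min (argInt (u.reg .rcx)) (D : Int) →
      zd = BitVec.ofNat 32 D * Word.part .w32 z →
      s.rip = Vorbis.L.codebook_decode_step.loop1 →
      s.reg .rbp = Word.ofBV 0#32 →
      s.reg .r14 = Word.ofBV zd →
      s.reg .r15 = Word.ofBV (Word.part .w32 (u.reg .r8)) →
      s.reg .r13 = Word.ofBV n13 →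
      s.reg .r12 = u.reg .rsi →
      s.reg .rsp = u.reg .rsp - 72 →
      RegsKept [Reg.rbp, Reg.r14, Reg.rbx, Reg.r15, Reg.r13, Reg.r12, Reg.rsp, Reg.rax, Reg.rcx, Reg.rdx, Reg.rsi, Reg.rdi,
        Reg.r8, Reg.r9, Reg.r10, Reg.r11, Reg.r16, Reg.r17, Reg.r18, Reg.r19, Reg.r20, Reg.r21, Reg.r22, Reg.r23, Reg.r24,
        Reg.r25, Reg.r26, Reg.r27, Reg.r28, Reg.r29, Reg.r30, Reg.r31] u s →
      Mem.EqOn Vorbis.L.textLo Vorbis.L.textHi u₀.mem s.mem →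
      s.flags .df = false →
      s.mxcsr &&& 0x1F80 = 0x1F80 →
      Mem.SameExcept [⟨(u.reg .rsp).toNat - 512, (u.reg .rsp).toNat⟩,
        ⟨(u.reg .rdi).toNat + 48, (u.reg .rdi).toNat + 56⟩, ⟨(u.reg .rdi).toNat + 84, (u.reg .rdi).toNat + 96⟩,
        ⟨(u.reg .rdi).toNat + 136, (u.reg .rdi).toNat + 144⟩, ⟨(u.reg .rdi).toNat + 1484, (u.reg .rdi).toNat + 1749⟩,
        ⟨(u.reg .rdi).toNat + 1752, (u.reg .rdi).toNat + 1784⟩,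
        ⟨(u.reg .rdx).toNat, (u.reg .rdx).toNat + W⟩] u.mem s.mem →
      ShadowUntouched u.mem s.mem →
      Mem.EqOn (u.reg .rdi).toNat ((u.reg .rdi).toNat + 1808) s_10e5dcr.mem s.mem →
      UInt64.ofNat (s.mem.readLE (u.reg .rsp) 8) = ret →
      UInt64.ofNat (s.mem.readLE (u.reg .rsp - 8) 8) = u.reg .r15 →
      UInt64.ofNat (s.mem.readLE (u.reg .rsp - 16) 8) = u.reg .r14 →
      UInt64.ofNat (s.mem.readLE (u.reg .rsp - 24) 8) = u.reg .r13 →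
      UInt64.ofNat (s.mem.readLE (u.reg .rsp - 32) 8) = u.reg .r12 →
      UInt64.ofNat (s.mem.readLE (u.reg .rsp - 40) 8) = u.reg .rbp →
      UInt64.ofNat (s.mem.readLE (u.reg .rsp - 48) 8) = u.reg .rbx →
      UInt64.ofNat (s.mem.readLE (u.reg .rsp - 64) 8) = u.reg .rdx →
      s.mem.readLE (u.reg .rsi + 32) 8 = M →
      ReachVia Lay μ WayInv s (Returned (conv u₀) (codebook_decode_step.spec others frames Blk len) u ret) := by
    intro s n13 zd hmsb hn13 hzd w_rip w_rbp0 w_r14 w_r15 w_r13 w_r12 w_rsp w_kept w_eq hdf hmx hsame hun hobj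
      hl0 hl1 hl2 hl3 hl4 hl5 hl6 hl7 hM
    clear w_same hs0 hs1 hs2 hs3 hs4 hs5 hs6 hs7 hDr hMr w_sse w_mx w_df w_inv w_code
    -- what codebook_decode_start returned: `0 ≤ z < N(c)`, and the book has a table (`lookup_type = 2`)
    have hZ := Vorbis.Spec.codebook_decode_step.lt_of_msb_false z hmsb
    obtain ⟨Z, hZdef⟩ : ∃ Z, z.toNat % 2 ^ 32 = Z := ⟨_, rfl⟩
    rw [hZdef] at hZ
    have hzN : (Z : Int) < Codebook.N u.mem (u.reg .rsi).toNat ∧ Codebook.lookup_type u.mem (u.reg .rsi).toNat = 2 := by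
      have e : argInt z = (Z : Int) := by
        rw [argInt_def, hZdef]
        have := sint32_cases Z
        omega
      rw [e] at hpres
      rcases hpres with h | ⟨_, h1, h2⟩
      · omega
      · exact ⟨h1, h2⟩
    obtain ⟨hzN, hlt⟩ := hzN
    have hidx : ∀ i, i < D → Z * D + i < 0x20000000 := by
      intro i hi
      have := hbp.cb.multiplicands_index_lt hlt Z i hzN (by rw [hdimD]; omega)
      rw [hdimD, Int.toNat_natCast] at this
      exact this
    have hzdn : zd.toNat = Z * D := by
      have h0 := hidx 0 (by omega)
      rw [hzd, Vorbis.Spec.codebook_decode_step.mul_toNat, toNat_ofNat32 D hD32, Asan.part32_toNat, hZdef, Nat.mul_comm]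
      rw [toNat_ofNat32 D hD32, Asan.part32_toNat, hZdef, Nat.mul_comm]
      omega
    have hMblk : M + 4 * (Z * D + D) ≤ 0xC00000 := by
      obtain ⟨sz, hsz, hblk⟩ := hbp.cb.K6.mults hlt
      have hin := hbp.ok.inside _ hblk
      rw [hmul] at hin
      rw [hdimD, Int.toNat_natCast] at hsz
      have hN : Z + 1 ≤ (Codebook.N u.mem (u.reg .rsi).toNat).toNat := by omega
      have hmulle : (Z + 1) * D ≤ (Codebook.N u.mem (u.reg .rsi).toNat).toNat * D := Nat.mul_le_mul_right D hN
      rw [Nat.add_mul, Nat.one_mul] at hmulle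
      simp only [] at hin
      omega
    have hsiteM : ∀ i, i < D → Site (Live (stackObjs frames ++ others)) (M + 4 * (Z * D + i)) 4 := by
      intro i hi
      refine hbp.cb.site_multiplicands hbp.reader.env.live hlt Z i hzN (by rw [hdimD]; omega) ?_
      simp only [Codebook.multiplicands_at]
      rw [hmul, hdimD, Int.toNat_natCast]
    obtain ⟨ib, w_rbp, hib⟩ : ∃ ib : BitVec 32, s.reg .rbp = Word.ofBV ib ∧ ib.toNat < 2 ^ 31 :=
      ⟨0#32, w_rbp0, by decide⟩
    clear w_rbp0
    u_loop [ib] (fun v => 65536 - (v.reg .rbp).toNat)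
    -- 0x10e615: `cmp r13d, ebp ; jle` — the exit is walked to the `ret`, the body stops before its first check call
    u_walk hcode [hμ.vendor] until [Vorbis.L.codebook_decode_step.chk2, Vorbis.L.codebook_decode_step.loop1] span [Vorbis.L.textLo, Vorbis.L.textHi] side (v_side)
    · -- 0x10e691: `return TRUE`
      refine ReachVia.done (Or.inl ?_)
      v_returned
      refine ⟨?_, ?_, Or.inr w_rax⟩
      · rw [w_mem]
        exact hun
      · rw [w_mem]
        exact Vorbis.Spec.codebook_decode_step.reader_carry hrp0 hobj (by omega)
    · -- 0x10e61a: the body, `i < len'`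
      have hibn : (ib.toNat : Int) < min (argInt (u.reg .rcx)) (D : Int) := by
        rw [Vorbis.Spec.codebook_decode_step.toInt_small ib hib] at hbr_10e618
        omega
      have hi : ib.toNat < decodeLen u.mem (u.reg .rsi).toNat (argInt (u.reg .rcx)) := by
        unfold decodeLen
        rw [hdimD]
        omega
      have hiD : ib.toNat < D := by omega
      obtain ⟨hfw1, hfw2, hfw3⟩ := hfw ib.toNat hi
      have hws := site_where hsh.inv hsh.offText htop hfw3.site
      have hwo := hfw3.offObj
      have hwb := hfw3.offBook
      simp only [vblock, voff] at hwo hwb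
      have e8 : (Word.part .w32 (u.reg .r8)).toNat = argU32 (u.reg .r8) := Asan.part32_toNat _
      obtain ⟨P, hP⟩ : ∃ P, ib.toNat * argU32 (u.reg .r8) = P := ⟨_, rfl⟩
      rw [hP] at hfw1 hfw2
      have e : L.textHi = 0x119d40 := rfl
      rw [e] at hws
      have hidx' := hidx ib.toNat hiD
      have haddrM : (Word.ofBV (BitVec.signExtend 64 (BitVec.setWidth 32 (Word.ofBV ib + Word.ofBV zd).toBitVec)) <<< 2 +
          UInt64.ofNat M).toNat = M + 4 * (Z * D + ib.toNat) := by
        rw [Vorbis.Spec.codebook_decode_step.mult_addr ib zd M (by omega) (by omega), hzdn]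
      have haddrO : (u.reg .rdx + Word.ofBV (BitVec.signExtend 64 (ib * Word.part .w32 (u.reg .r8))) * 4).toNat =
          (u.reg .rdx).toNat + 4 * P := by
        rw [Vorbis.Spec.codebook_decode_step.out_addr (u.reg .rdx) ib _ (by rw [e8, hP]; omega) (by rw [e8, hP]; omega), e8, hP]
      have hsiteO : Site (Live (stackObjs frames ++ others)) ((u.reg .rdx).toNat + 4 * P) 4 :=
        hfw3.site.sub (by omega) (by omega) (by omega)
      have hsiteMi := hsiteM ib.toNat hiD
      -- (`cbw_if`, `ne16`, `ne32`: the rewrite rules for the `cdqe` at 0x10e652, see `cbw_if`)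
      u_walk hcode [hμ.vendor, ↓Vorbis.Spec.codebook_decode_step.cbw_if, Vorbis.Spec.codebook_decode_step.ne16,
        Vorbis.Spec.codebook_decode_step.ne32] until [Vorbis.L.codebook_decode_step.loop1] span [Vorbis.L.textLo, Vorbis.L.textHi] side (v_side)
      case check_10e61f =>
        -- 0x10e61f: load8 `c->multiplicands` (c + 0x20), inside the struct
        have hun' : ShadowUntouched u.mem s_10e61f.mem := by v_untouched
        exact check_site hsh.inv hun' (Vorbis.Spec.codebook_decode_step.book_site hbp 32 8 (by decide) (by decide))
          (by u_omega)
      case check_10e638 =>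
        -- 0x10e638: load4 `multiplicands[z * d + i]` (K6)
        have hun' : ShadowUntouched u.mem s_10e638.mem := by v_untouched
        exact check_site hsh.inv hun' hsiteMi haddrM
      case check_10e660 =>
        -- 0x10e660: load4 `output[i * step]` (the precondition's window)
        have hun' : ShadowUntouched u.mem s_10e660.mem := by v_untouched
        exact check_site hsh.inv hun' hsiteO haddrO
      case check_10e677 =>
        -- 0x10e677: load1 `c->sequence_p` (c + 0x1a), inside the struct
        have hun' : ShadowUntouched u.mem s_10e677.mem := by v_untouched
        exact check_site hsh.inv hun' (Vorbis.Spec.codebook_decode_step.book_site hbp 26 1 (by decide) (by decide))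
          (by u_omega)
      · -- the back edge, `c->sequence_p = 0`
        try clear w_zmm
        u_loop_back [ib + 1#32]
        · -- the direction flag: the last check kept it, the `add` wrote status flags only
          rw [w_flags]
          simp only [X86.User.df_setStatus]
          exact w_df_10e677
        · -- the MXCSR masks: the last `addss` kept them
          rw [w_mxcsr]
          exact hmx_10e66a
        · -- still no store to the shadow
          v_untouched
        · -- `*f` is as codebook_decode_start left it
          rw [w_mem]
          u_eqon
        · rw [Vorbis.Spec.codebook_decode_step.succ_toNat ib (by omega)]
          omega
        · rw [w_rbp, Vorbis.toNat_ofBV32, Vorbis.toNat_ofBV32, Vorbis.Spec.codebook_decode_step.succ_toNat ib (by omega)]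
          omega
      · -- the back edge, `c->sequence_p ≠ 0`: `last = val`
        try clear w_zmm
        u_loop_back [ib + 1#32]
        · -- the direction flag: the last check kept it, the `add` wrote status flags only
          rw [w_flags]
          simp only [X86.User.df_setStatus]
          exact w_df_10e677
        · -- the MXCSR masks: the last `addss` kept them
          rw [w_mxcsr]
          exact hmx_10e66a
        · -- still no store to the shadow
          v_untouched
        · -- `*f` is as codebook_decode_start left it
          rw [w_mem]
          u_eqon
        · rw [Vorbis.Spec.codebook_decode_step.succ_toNat ib (by omega)]
          omega
        · rw [w_rbp, Vorbis.toNat_ofBV32, Vorbis.toNat_ofBV32, Vorbis.Spec.codebook_decode_step.succ_toNat ib (by omega)]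
          omega
  -- 0x10e5e1 … 0x10e610: `if (z < 0) return FALSE`, the clamp of `len`, `z *= c->dimensions`, `last = 0`, `i = 0`
  u_walk hcode [hμ.vendor] until [Vorbis.L.codebook_decode_step.loop1] span [Vorbis.L.textLo, Vorbis.L.textHi] side (v_side)
  · -- 0x10e5ee: load4 `c->dimensions` (c + 0), inside the struct
    have hun' : ShadowUntouched u.mem s_10e5ee.mem := by v_untouched
    exact check_site hsh.inv hun' (Vorbis.Spec.codebook_decode_step.book_site hbp 0 4 (by decide) (by decide))
      (by u_omega)
  · -- 0x10e6a5: `z < 0`: `return FALSE`, no float was touched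
    refine ReachVia.done ?_
    v_returned
    refine ⟨?_, ?_, Or.inl w_rax⟩
    · v_untouched
    · rw [w_mem]
      exact hrp0
  · -- `len ≤ c->dimensions`: r13d = len
    have hn13 : (Word.part .w32 (u.reg .rcx)).toInt = min (argInt (u.reg .rcx)) (D : Int) := by
      rw [toInt_of_lt (BitVec.ofNat 32 D) (by rw [toNat_ofNat32 D hD32]; omega), toNat_ofNat32 D hD32, part32_toInt] at hbr_10e5fa
      rw [part32_toInt, argInt_def]
      omega
    refine hloop s_10e610 _ _ hbr_10e5e3 hn13 rfl w_rip w_rbp w_r14 w_r15 w_r13 w_r12 w_rsp w_kept w_eq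
      ?_ ?_ ?_ ?_ ?_ ?_ ?_ ?_ ?_ ?_ ?_ ?_ ?_ ?_
    · -- the direction flag: the check kept it
      rw [w_flags]
      simp only [X86.User.df_setStatus]
      exact w_df_10e5ee
    · rw [w_mxcsr]
      exact w_mx
    · u_same
    · v_untouched
    · rw [w_mem]
      u_eqon
    · u_frame hs0
    · u_frame hs1
    · u_frame hs2
    · u_frame hs3
    · u_frame hs4
    · u_frame hs5
    · u_frame hs6
    · u_frame hs7
    · u_frame hMr
  · -- `len > c->dimensions`: r13d = dimensions
    have hn13 : (BitVec.ofNat 32 D).toInt = min (argInt (u.reg .rcx)) (D : Int) := by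
      rw [toInt_of_lt (BitVec.ofNat 32 D) (by rw [toNat_ofNat32 D hD32]; omega), toNat_ofNat32 D hD32, part32_toInt] at hbr_10e5fa
      rw [toInt_of_lt (BitVec.ofNat 32 D) (by rw [toNat_ofNat32 D hD32]; omega), toNat_ofNat32 D hD32, argInt_def]
      omega
    refine hloop s_10e610 _ _ hbr_10e5e3 hn13 rfl w_rip w_rbp w_r14 w_r15 w_r13 w_r12 w_rsp w_kept w_eq
      ?_ ?_ ?_ ?_ ?_ ?_ ?_ ?_ ?_ ?_ ?_ ?_ ?_ ?_
    · -- the direction flag: the check kept it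
      rw [w_flags]
      simp only [X86.User.df_setStatus]
      exact w_df_10e5ee
    · rw [w_mxcsr]
      exact w_mx
    · u_same
    · v_untouched
    · rw [w_mem]
      u_eqon
    · u_frame hs0
    · u_frame hs1
    · u_frame hs2
    · u_frame hs3
    · u_frame hs4
    · u_frame hs5
    · u_frame hs6
    · u_frame hs7
    · u_frame hMr
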